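-- pv_equiv track=rewrite | github.com/Otoehe/Buy-My-Behavior | scan_bmb_names.py | bad_chars
-- ===== SOURCE A (Python) =====
-- ILLEGAL_CHARS = set('<>:"/\\|?*')
--
-- CONTROL_CHARS = {chr(c) for c in range(0x00, 0x20)}  # 0x00-0x1F
--
-- def bad_chars(s: str) -> str:
--     # show the specific offending characters (unique, in order of appearance)
--     seen = set()
--     out = []
--     for ch in s:
--         cond = (
--             ord(ch) > 127 or
--             ch in ILLEGAL_CHARS or
--             ch in CONTROL_CHARS
--         )
--         if cond and ch not in seen:
--             out.append(ch)
--             seen.add(ch)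
--     return ''.join(out)
-- ===== SOURCE B (Python) =====
-- ILLEGAL_CHARS = set('<>:"/\\|?*')
--
-- CONTROL_CHARS = {chr(c) for c in range(0x00, 0x20)}  # 0x00-0x1F
--
--
-- def bad_chars(s: str) -> str:
--     # stage 1: collect the (unordered) set of offending characters;
--     # stage 2: reconstruct first-appearance order by sorting on each
--     # character's first index in s (distinct chars -> distinct indices).
--     uniq = {ch for ch in s
--             if ord(ch) > 127 or ch in ILLEGAL_CHARS or ch in CONTROL_CHARS}
--     return ''.join(sorted(uniq, key=s.index))
-- ===== Notes on version B (the rewrite author's own statement) =====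
-- stated objective: alternative
-- what changed: Instead of preserving order in one pass with a seen-set and a membership branch, B collects the unordered set of offending characters and then reconstructs first-appearance order by sorting them on s.index.
import Mathlib
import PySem

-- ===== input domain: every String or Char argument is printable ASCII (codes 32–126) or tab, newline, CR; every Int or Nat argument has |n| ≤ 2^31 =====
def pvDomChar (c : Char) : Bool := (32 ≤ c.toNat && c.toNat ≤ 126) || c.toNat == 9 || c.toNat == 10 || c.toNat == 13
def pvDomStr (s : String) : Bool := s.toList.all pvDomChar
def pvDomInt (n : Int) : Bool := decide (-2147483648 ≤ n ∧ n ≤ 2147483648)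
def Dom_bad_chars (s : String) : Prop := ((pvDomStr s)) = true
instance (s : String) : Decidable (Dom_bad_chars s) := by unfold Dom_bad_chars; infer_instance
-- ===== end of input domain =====

-- B drops A's single ordered pass (seen-set + output list) for: build the unordered
-- set of offending chars, then sort it by first index in s; objective: alternative.

-- module-level constants shared by both versions
def ILLEGAL_CHARS : PySem.Set Char := PySem.Set.ofList "<>:\"/\\|?*".toList

def CONTROL_CHARS : PySem.Set Char :=
  PySem.Set.ofList ((PySem.List.pyRange 0 32 1).map (fun n => Char.ofNat n.toNat))

-- the offending-character condition (the same boolean expression both Pythons evaluate)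
def pvBad (ch : Char) : Bool :=
  decide (ch.toNat > 127) || PySem.Set.contains ILLEGAL_CHARS ch ||
  PySem.Set.contains CONTROL_CHARS ch

-- ===== PORT A =====
def bad_chars (s : String) : String :=
  let r := s.toList.foldl (fun (st : PySem.Set Char × List Char) ch =>
      let cond := pvBad ch
      if cond && !(PySem.Set.contains st.1 ch) then (PySem.Set.add st.1 ch, st.2 ++ [ch])
      else st) (PySem.Set.empty, [])
  String.ofList r.2

-- ===== PORT B =====
-- s.index(ch): ch always occurs in s here (every sorted element came from s),
-- so `(index? …).getD 0` is exact — the getD default is never taken.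
def bad_chars_alt (s : String) : String :=
  let uniq : PySem.Set Char := PySem.Set.ofList (s.toList.filter pvBad)
  String.ofList (PySem.List.sorted uniq
    (fun ch => (PySem.List.index? s.toList ch).getD 0) false)

-- ===== PRECONDITION & SPEC =====
def Spec_bad_chars (s : String) (out : String) : Prop := out = bad_chars_alt s
instance (s : String) (out : String) : Decidable (Spec_bad_chars s out) := by unfold Spec_bad_chars; infer_instance

-- ===== CLAIM (what is proved, stated in full; the proofs are below) =====
def Claim_equal_bad_chars : Prop := ∀ (s : String), Dom_bad_chars s → Spec_bad_chars s (bad_chars s)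

-- ===== LEMMAS AND PROOFS =====

-- A's loop body, named for the proofs
def pvStep (st : PySem.Set Char × List Char) (ch : Char) : PySem.Set Char × List Char :=
  let cond := pvBad ch
  if cond && !(PySem.Set.contains st.1 ch) then (PySem.Set.add st.1 ch, st.2 ++ [ch])
  else st

lemma pvStep_diag (acc : PySem.Set Char) (ch : Char) :
    pvStep (acc, acc) ch =
      ((if pvBad ch then PySem.Set.add acc ch else acc),
       (if pvBad ch then PySem.Set.add acc ch else acc)) := by
  by_cases hb : pvBad ch = true
  · by_cases hc : PySem.Set.contains acc ch = true
    · have hm : ch ∈ acc := by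
        simp only [PySem.Set.contains] at hc; simpa using hc
      simp [pvStep, hb, hm, PySem.Set.add]
    · have hm : ch ∉ acc := by
        simp only [PySem.Set.contains] at hc; simpa using hc
      simp [pvStep, hb, hm, PySem.Set.add]
  · simp [pvStep, hb]

lemma bad_chars_loop (xs : List Char) (acc : PySem.Set Char) :
    xs.foldl pvStep (acc, acc)
      = (acc.update (xs.filter pvBad), acc.update (xs.filter pvBad)) := by
  induction xs generalizing acc with
  | nil => simp [PySem.Set.update]
  | cons ch xs ih =>
    rw [List.foldl_cons, pvStep_diag, List.filter_cons]
    by_cases hb : pvBad ch = true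
    · rw [if_pos hb, ih]
      simp [PySem.Set.update, hb]
    · rw [if_neg hb, ih]
      simp [hb]

-- first-index key used by B
def pvIdx (l : List Char) (c : Char) : Nat := (PySem.List.index? l c).getD 0

lemma pvIdx_cons_of_ne {l : List Char} {c x : Char} (hne : x ≠ c) (hm : x ∈ l) :
    pvIdx (c :: l) x = pvIdx l x + 1 := by
  have h2 : PySem.List.index? l x ≠ none :=
    fun hn => ((Iff.mp (PySem.List.index?_eq_none_iff l x) hn)) hm
  obtain ⟨k, hk⟩ := Option.ne_none_iff_exists'.mp h2
  rw [pvIdx, pvIdx, PySem.List.index?_cons_of_ne, hk]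
  · rfl
  · exact Ne.symm hne

-- ofList of a filtered list is strictly increasing in first index in the base list
lemma ofList_filter_pairwise (p : Char → Bool) (l : List Char) :
    (PySem.Set.ofList (l.filter p)).Pairwise (fun a b => pvIdx l a < pvIdx l b) := by
  induction l with
  | nil => simp [PySem.Set.ofList]
  | cons c t ih =>
    rw [List.filter_cons]
    by_cases hp : p c = true
    · rw [if_pos hp]
      rw [PySem.Set.ofList_cons]
      constructor
      · intro b hb
        have hbne : b ≠ c := by simpa using List.of_mem_filter hb
        have hbm : b ∈ t := List.mem_filter.mp
          ((PySem.Set.mem_ofList ..).mp (List.mem_of_mem_filter hb)) |>.1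
        have h0 : pvIdx (c :: t) c = 0 := by
          rw [pvIdx, PySem.List.index?_cons_self]; rfl
        rw [pvIdx_cons_of_ne hbne hbm, h0]
        omega
      · refine ((ih.filter _).imp_of_mem ?_)
        intro a b ha hb hab
        have ham := List.mem_of_mem_filter ha
        have hbm := List.mem_of_mem_filter hb
        have hane : a ≠ c := by simpa using List.of_mem_filter ha
        have hbne : b ≠ c := by simpa using List.of_mem_filter hb
        have ha' : a ∈ t := (List.mem_filter.mp ((PySem.Set.mem_ofList ..).mp ham)).1
        have hb' : b ∈ t := (List.mem_filter.mp ((PySem.Set.mem_ofList ..).mp hbm)).1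
        rw [pvIdx_cons_of_ne hane ha', pvIdx_cons_of_ne hbne hb']
        omega
    · rw [if_neg hp]
      refine ih.imp_of_mem ?_
      intro a b ha hb hab
      have hpa : p a = true := (List.mem_filter.mp ((PySem.Set.mem_ofList ..).mp ha)).2
      have hpb : p b = true := (List.mem_filter.mp ((PySem.Set.mem_ofList ..).mp hb)).2
      have ha' : a ∈ t := (List.mem_filter.mp ((PySem.Set.mem_ofList ..).mp ha)).1
      have hb' : b ∈ t := (List.mem_filter.mp ((PySem.Set.mem_ofList ..).mp hb)).1
      have hane : a ≠ c := fun h => by rw [h] at hpa; exact absurd hpa (by simpa using hp)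
      have hbne : b ≠ c := fun h => by rw [h] at hpb; exact absurd hpb (by simpa using hp)
      rw [pvIdx_cons_of_ne hane ha', pvIdx_cons_of_ne hbne hb']
      omega

-- ===== VERDICT (by name: the statement is the Claim_ definition above) =====
theorem bad_chars_spec : Claim_equal_bad_chars := by
  intro s _
  show bad_chars s = bad_chars_alt s
  unfold bad_chars bad_chars_alt
  have h := bad_chars_loop s.toList PySem.Set.empty
  rw [show (fun (st : PySem.Set Char × List Char) ch =>
      let cond := pvBad ch
      if cond && !(PySem.Set.contains st.1 ch) then (PySem.Set.add st.1 ch, st.2 ++ [ch])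
      else st) = pvStep from rfl]
  show String.ofList (List.foldl pvStep (PySem.Set.empty, PySem.Set.empty) s.toList).2 = _
  rw [h]
  have hsorted : PySem.List.sorted (PySem.Set.ofList (s.toList.filter pvBad))
      (fun ch => pvIdx s.toList ch) false
      = PySem.Set.ofList (s.toList.filter pvBad) :=
    PySem.List.sorted_eq_of_perm_of_pairwise_lt _ _ _
      (List.Perm.refl _) (ofList_filter_pairwise pvBad s.toList)
  show String.ofList (PySem.Set.update PySem.Set.empty (s.toList.filter pvBad))
      = String.ofList (PySem.List.sorted (PySem.Set.ofList (s.toList.filter pvBad))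
          (fun ch => pvIdx s.toList ch) false)
  rw [hsorted]
  simp [PySem.Set.update, PySem.Set.empty, PySem.Set.ofList_eq_foldl]
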